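-- pv_equiv track=rewrite | github.com/LalitGsk/Programming-Exercieses | Hackerrank/numberSigningSum.py | numberSigningSum
-- ===== SOURCE A (Python) =====
-- def numberSigningSum(n):
-- 	a = str(n)
-- 	res=0
-- 	for i in range(len(a)):
-- 		if i%2!=0:
-- 			res = res - int(a[i])
-- 		else:
-- 			res+= int(a[i])
--
-- 	return(res)
-- ===== SOURCE B (Python) =====
-- def numberSigningSum(n):
--     def go(s):
--         if not s:
--             return 0
--         if len(s) == 1:
--             return int(s[0])
--         return int(s[0]) - int(s[1]) + go(s[2:])
--     return go(str(n))
-- ===== Notes on version B (the rewrite author's own statement) =====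
-- stated objective: alternative
-- what changed: Replaces the indexed loop with an i%2 parity branch by a two-digits-at-a-time recursion over the string (add the first, subtract the second, recurse on the rest), with no index variable or parity test.
import Mathlib
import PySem

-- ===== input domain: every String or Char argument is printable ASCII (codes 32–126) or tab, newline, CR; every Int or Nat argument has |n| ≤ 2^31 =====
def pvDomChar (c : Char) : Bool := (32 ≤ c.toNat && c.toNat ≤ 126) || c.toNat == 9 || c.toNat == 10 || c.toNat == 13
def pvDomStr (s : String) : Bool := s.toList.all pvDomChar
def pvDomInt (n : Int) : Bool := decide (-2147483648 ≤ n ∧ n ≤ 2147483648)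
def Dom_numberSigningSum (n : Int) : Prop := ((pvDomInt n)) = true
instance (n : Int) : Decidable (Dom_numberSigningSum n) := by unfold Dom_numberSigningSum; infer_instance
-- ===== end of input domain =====

-- B replaces A's indexed loop with an i%2 branch by a two-digits-at-a-time recursion; alternative structure, same cost.
-- int(c) on a single character, shared by both ports
def pvDigit (c : Char) : Int := (PySem.Int.ofChars? [c]).getD 0

-- ===== PORT A =====
def numberSigningSum (n : Int) : Int :=
  let a := PySem.Int.toChars n
  (PySem.List.pyRange 0 (a.length : Int) 1).foldl
    (fun res i =>
      if PySem.Int.mod i 2 ≠ 0 then res - pvDigit (PySem.List.pyGetD a i ' ')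
      else res + pvDigit (PySem.List.pyGetD a i ' ')) 0

-- ===== PORT B =====
def pvGo : List Char → Int
  | [] => 0
  | [c] => pvDigit c
  | c1 :: c2 :: rest => pvDigit c1 - pvDigit c2 + pvGo rest

def numberSigningSum_alt (n : Int) : Int := pvGo (PySem.Int.toChars n)

-- ===== PRECONDITION & SPEC =====
-- Pre_ excludes n < 0, where str(n) starts with '-' and both Pythons raise ValueError at int('-').
def Pre_numberSigningSum (n : Int) : Prop := 0 ≤ n
instance (n : Int) : Decidable (Pre_numberSigningSum n) := by unfold Pre_numberSigningSum; infer_instance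
def pvWitness_numberSigningSum : Int := 12345

def Spec_numberSigningSum (n : Int) (out : Int) : Prop := out = numberSigningSum_alt n
instance (n : Int) (out : Int) : Decidable (Spec_numberSigningSum n out) := by unfold Spec_numberSigningSum; infer_instance

-- ===== CLAIM (what is proved, stated in full; the proofs are below) =====
def Claim_equal_numberSigningSum : Prop := ∀ (n : Int), Dom_numberSigningSum n → Pre_numberSigningSum n → Spec_numberSigningSum n (numberSigningSum n)

-- ===== LEMMAS AND PROOFS =====

-- A's indexed loop starting at an even index j computes res + pvGo (a.drop j)
lemma pv_loop_eq (cs : List Char) : ∀ (a : List Char) (j : Nat) (res : Int),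
    a.drop j = cs → j % 2 = 0 →
    (PySem.List.pyRange (j : Int) (a.length : Int) 1).foldl
      (fun res i =>
        if PySem.Int.mod i 2 ≠ 0 then res - pvDigit (PySem.List.pyGetD a i ' ')
        else res + pvDigit (PySem.List.pyGetD a i ' ')) res = res + pvGo cs := by
  induction cs using pvGo.induct with
  | case1 =>
      intro a j res h _
      have hlen : a.length ≤ j := by
        simpa using List.drop_eq_nil_iff.mp h
      rw [PySem.List.pyRange_one_eq_nil (by exact_mod_cast hlen)]
      simp [pvGo]
  | case2 c =>
      intro a j res h hj
      have hlen : a.length = j + 1 := by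
        have := congrArg List.length h
        simp at this
        omega
      have hget : PySem.List.pyGetD a (j : Int) ' ' = c := by
        rw [PySem.List.pyGetD_natCast]
        have h0 : (a.drop j)[0]? = a[j + 0]? := List.getElem?_drop
        rw [h] at h0
        simp at h0
        simp [List.getD, ← h0]
      have hmod : PySem.Int.mod (j : Int) 2 = 0 := by
        rw [PySem.Int.mod_eq_emod_of_pos (by norm_num)]
        omega
      rw [PySem.List.pyRange_one_cons (by push_cast [hlen]; omega),
          PySem.List.pyRange_one_eq_nil (by push_cast [hlen]; omega)]
      simp only [List.foldl_cons, List.foldl_nil]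
      rw [hmod, hget]
      simp [pvGo]
  | case3 c1 c2 rest ih =>
      intro a j res h hj
      have hlen : j + 2 ≤ a.length := by
        have := congrArg List.length h
        simp at this
        omega
      have hget1 : PySem.List.pyGetD a (j : Int) ' ' = c1 := by
        rw [PySem.List.pyGetD_natCast]
        have h0 : (a.drop j)[0]? = a[j + 0]? := List.getElem?_drop
        rw [h] at h0
        simp at h0
        simp [List.getD, ← h0]
      have hget2 : PySem.List.pyGetD a ((j : Int) + 1) ' ' = c2 := by
        have hc : ((j : Int) + 1) = ((j + 1 : Nat) : Int) := by push_cast; ring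
        rw [hc, PySem.List.pyGetD_natCast]
        have h0 : (a.drop j)[1]? = a[j + 1]? := List.getElem?_drop
        rw [h] at h0
        simp at h0
        simp [List.getD, ← h0]
      have hmod1 : PySem.Int.mod (j : Int) 2 = 0 := by
        rw [PySem.Int.mod_eq_emod_of_pos (by norm_num)]
        omega
      have hmod2 : PySem.Int.mod ((j : Int) + 1) 2 = 1 := by
        rw [PySem.Int.mod_eq_emod_of_pos (by norm_num)]
        omega
      rw [PySem.List.pyRange_one_cons (by omega), List.foldl_cons,
          PySem.List.pyRange_one_cons (by omega), List.foldl_cons]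
      rw [hmod1, hmod2, hget1, hget2,
          if_neg (show ¬((0:Int) ≠ 0) by norm_num), if_pos (show (1:Int) ≠ 0 by norm_num)]
      have hdrop : a.drop (j + 2) = rest := by
        have h2 : (a.drop j).drop 2 = rest := by rw [h]; rfl
        rwa [List.drop_drop] at h2
      have hcast : ((j : Int) + 1 + 1) = ((j + 2 : Nat) : Int) := by push_cast; ring
      rw [hcast, ih a (j + 2) _ hdrop (by omega)]
      simp only [pvGo]
      ring

-- ===== VERDICT (by name: the statement is the Claim_ definition above) =====
theorem numberSigningSum_spec : Claim_equal_numberSigningSum := by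
  intro n _ _
  unfold Spec_numberSigningSum numberSigningSum numberSigningSum_alt
  have := pv_loop_eq (PySem.Int.toChars n) (PySem.Int.toChars n) 0 0 (by simp) (by decide)
  simpa using this
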